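-- pv_equiv track=rewrite | github.com/quan3c10/robotframework-common-keywords | libraries/password_helpers.py | _has_sequential
-- ===== SOURCE A (Python) =====
-- def _has_sequential(s: str) -> bool:
--     """True if ``s`` contains 3+ ascending or descending consecutive codepoints."""
--     for i in range(len(s) - 2):
--         a, b, c = ord(s[i]), ord(s[i + 1]), ord(s[i + 2])
--         if b == a + 1 and c == b + 1:
--             return True
--         if b == a - 1 and c == b - 1:
--             return True
--     return False
-- ===== SOURCE B (Python) =====
-- def _has_sequential(s: str) -> bool:
--     """True if ``s`` contains 3+ ascending or descending consecutive codepoints."""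
--     asc = desc = 1
--     for i in range(len(s) - 1):
--         diff = ord(s[i + 1]) - ord(s[i])
--         asc = asc + 1 if diff == 1 else 1
--         desc = desc + 1 if diff == -1 else 1
--         if asc >= 3 or desc >= 3:
--             return True
--     return False
-- ===== Notes on version B (the rewrite author's own statement) =====
-- stated objective: alternative
-- what changed: Replaces A's three-element sliding-window check (re-reading each character up to three times) with a single pass over adjacent pairs maintaining ascending/descending run-length counters that reset to 1 on interruption.
import Mathlib
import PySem

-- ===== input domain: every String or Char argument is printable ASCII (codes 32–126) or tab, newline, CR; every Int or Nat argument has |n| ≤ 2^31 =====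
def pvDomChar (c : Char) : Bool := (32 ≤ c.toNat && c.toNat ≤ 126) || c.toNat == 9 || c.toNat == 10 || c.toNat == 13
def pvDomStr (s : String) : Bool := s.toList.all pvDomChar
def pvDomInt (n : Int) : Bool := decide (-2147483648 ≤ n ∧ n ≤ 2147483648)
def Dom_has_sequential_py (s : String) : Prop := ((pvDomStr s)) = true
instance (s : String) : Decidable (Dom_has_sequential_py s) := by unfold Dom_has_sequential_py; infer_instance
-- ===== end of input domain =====

-- B replaces A's three-element sliding-window scan with a single pass over adjacent
-- pairs maintaining ascending/descending run-length counters (alternative decomposition, same cost).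


-- ===== PORT A =====
-- index loop of A: for i in range(len(s) - 2): check the 3-window at i, early-return True
def aLoop (cs : List Char) (i : Nat) : Bool :=
  if h : i + 2 < cs.length then
    let a : Int := (cs[i]'(by omega)).toNat
    let b : Int := (cs[i+1]'(by omega)).toNat
    let c : Int := (cs[i+2]'h).toNat
    if b = a + 1 ∧ c = b + 1 then true
    else if b = a - 1 ∧ c = b - 1 then true
    else aLoop cs (i+1)
  else false
termination_by cs.length - i

def has_sequential_py (s : String) : Bool := aLoop s.toList 0

-- ===== PORT B =====
-- pair loop of B: walk adjacent pairs keeping run-length counters asc/desc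
def bLoop : List Char → Nat → Nat → Bool
  | x :: y :: rest, asc, desc =>
    let diff : Int := (y.toNat : Int) - (x.toNat : Int)
    let asc' := if diff = 1 then asc + 1 else 1
    let desc' := if diff = -1 then desc + 1 else 1
    if asc' ≥ 3 ∨ desc' ≥ 3 then true else bLoop (y :: rest) asc' desc'
  | _, _, _ => false

def has_sequential_py_alt (s : String) : Bool := bLoop s.toList 1 1

-- ===== PRECONDITION & SPEC =====
def Spec_has_sequential_py (s : String) (out : Bool) : Prop := out = has_sequential_py_alt s
instance (s : String) (out : Bool) : Decidable (Spec_has_sequential_py s out) := by unfold Spec_has_sequential_py; infer_instance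

-- ===== CLAIM (what is proved, stated in full; the proofs are below) =====
def Claim_equal_has_sequential_py : Prop := ∀ (s : String), Dom_has_sequential_py s → Spec_has_sequential_py s (has_sequential_py s)

-- ===== LEMMAS AND PROOFS =====

-- reference characterisation: structural 3-window scan
def hasTriple : List Char → Bool
  | x :: y :: z :: rest =>
    (decide (y.toNat = x.toNat + 1) && decide (z.toNat = y.toNat + 1)) ||
    (decide (x.toNat = y.toNat + 1) && decide (y.toNat = z.toNat + 1)) ||
    hasTriple (y :: z :: rest)
  | _ => false

def ascHead (x : Char) : List Char → Bool
  | y :: _ => decide (y.toNat = x.toNat + 1)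
  | [] => false

def descHead (x : Char) : List Char → Bool
  | y :: _ => decide (x.toNat = y.toNat + 1)
  | [] => false

set_option maxRecDepth 10000 in
lemma aLoop_eq (cs : List Char) (i : Nat) : aLoop cs i = hasTriple (cs.drop i) := by
  generalize hd : cs.length - i = d
  induction d using Nat.strong_induction_on generalizing i with
  | _ d ih =>
    rw [aLoop]
    by_cases h : i + 2 < cs.length
    · simp only [h, dif_pos]
      have h0 : i < cs.length := by omega
      have h1 : i + 1 < cs.length := by omega
      have ihx : aLoop cs (i+1) = hasTriple (cs.drop (i+1)) :=
        ih (cs.length - (i+1)) (by omega) (i+1) rfl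
      rw [List.drop_eq_getElem_cons h1, List.drop_eq_getElem_cons h] at ihx
      rw [List.drop_eq_getElem_cons h0, List.drop_eq_getElem_cons h1,
          List.drop_eq_getElem_cons h, hasTriple]
      split_ifs with h2 h3
      · have e1 : cs[i+1].toNat = cs[i].toNat + 1 := by omega
        have e2 : cs[i+2].toNat = cs[i+1].toNat + 1 := by omega
        simp [e1, e2]
      · have e1 : cs[i].toNat = cs[i+1].toNat + 1 := by omega
        have e2 : cs[i+1].toNat = cs[i+2].toNat + 1 := by omega
        simp [e1, e2]
      · rw [ihx]
        have hb1 : ¬ (cs[i+1].toNat = cs[i].toNat + 1 ∧ cs[i+2].toNat = cs[i+1].toNat + 1) := by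
          intro hc; exact h2 ⟨by omega, by omega⟩
        have hb2 : ¬ (cs[i].toNat = cs[i+1].toNat + 1 ∧ cs[i+1].toNat = cs[i+2].toNat + 1) := by
          intro hc; exact h3 ⟨by omega, by omega⟩
        have e1 : (decide (cs[i+1].toNat = cs[i].toNat + 1) &&
            decide (cs[i+2].toNat = cs[i+1].toNat + 1)) = false := by
          simp only [Bool.and_eq_false_iff, decide_eq_false_iff_not]; tauto
        have e2 : (decide (cs[i].toNat = cs[i+1].toNat + 1) &&
            decide (cs[i+1].toNat = cs[i+2].toNat + 1)) = false := by
          simp only [Bool.and_eq_false_iff, decide_eq_false_iff_not]; tauto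
        rw [e1, e2]
        simp
    · simp only [h, dif_neg]
      match hm : cs.drop i with
      | [] => rfl
      | [_] => rfl
      | [_, _] => rfl
      | _ :: _ :: _ :: _ =>
        exfalso
        have := congrArg List.length hm
        simp [List.length_drop] at this
        omega

set_option maxRecDepth 10000 in
lemma bLoop_eq (rest : List Char) : ∀ (x : Char) (asc desc : Nat),
    asc = 1 ∨ asc = 2 → desc = 1 ∨ desc = 2 →
    bLoop (x :: rest) asc desc =
      (hasTriple (x :: rest) || (decide (asc = 2) && ascHead x rest)
        || (decide (desc = 2) && descHead x rest)) := by
  induction rest with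
  | nil => intro x asc desc _ _; simp [bLoop, hasTriple, ascHead, descHead]
  | cons y rs ih =>
    intro x asc desc ha hd
    rw [bLoop]
    by_cases hret : ((if ((y.toNat : Int) - (x.toNat : Int)) = 1 then asc + 1 else 1) ≥ 3
        ∨ (if ((y.toNat : Int) - (x.toNat : Int)) = -1 then desc + 1 else 1) ≥ 3)
    · simp only [hret, if_pos]
      rcases hret with hr | hr
      · have hdiff : ((y.toNat : Int) - (x.toNat : Int)) = 1 := by
          by_contra hc; simp [hc] at hr
        have hasc : asc = 2 := by simp [hdiff] at hr; omega
        have : y.toNat = x.toNat + 1 := by omega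
        simp [hasc, ascHead, this]
      · have hdiff : ((y.toNat : Int) - (x.toNat : Int)) = -1 := by
          by_contra hc; simp [hc] at hr
        have hdesc : desc = 2 := by simp [hdiff] at hr; omega
        have : x.toNat = y.toNat + 1 := by omega
        simp [hdesc, descHead, this]
    · rw [if_neg hret]
      set asc' := if ((y.toNat : Int) - (x.toNat : Int)) = 1 then asc + 1 else 1 with hasc'
      set desc' := if ((y.toNat : Int) - (x.toNat : Int)) = -1 then desc + 1 else 1 with hdesc'
      have ha' : asc' = 1 ∨ asc' = 2 := by
        rw [hasc']; split_ifs with h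
        · rcases ha with h1 | h1
          · right; simp [h1]
          · exfalso; push_neg at hret; rw [hasc'] at hret; simp [h, h1] at hret
        · left; rfl
      have hd' : desc' = 1 ∨ desc' = 2 := by
        rw [hdesc']; split_ifs with h
        · rcases hd with h1 | h1
          · right; simp [h1]
          · exfalso; push_neg at hret; rw [hdesc'] at hret; simp [h, h1] at hret
        · left; rfl
      rw [ih y asc' desc' ha' hd']
      -- characterise asc' = 2 and desc' = 2 in the non-return branch
      have hA : (asc' = 2) ↔ (y.toNat = x.toNat + 1) := by
        rw [hasc']; split_ifs with h
        · push_neg at hret; rw [hasc'] at hret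
          rcases ha with h1 | h1
          · simp [h1, h]; omega
          · exfalso; simp [h, h1] at hret
        · constructor
          · intro hc; omega
          · intro hc; exfalso; apply h; omega
      have hD : (desc' = 2) ↔ (x.toNat = y.toNat + 1) := by
        rw [hdesc']; split_ifs with h
        · push_neg at hret; rw [hdesc'] at hret
          rcases hd with h1 | h1
          · simp [h1, h]; omega
          · exfalso; simp [h, h1] at hret
        · constructor
          · intro hc; omega
          · intro hc; exfalso; apply h; omega
      -- asc = 2 contributions at x are absorbed: in the non-return branch they can't fire
      have hNA : ¬ (asc = 2 ∧ y.toNat = x.toNat + 1) := by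
        rintro ⟨h1, h2⟩; push_neg at hret; rw [hasc'] at hret
        have : ((y.toNat : Int) - (x.toNat : Int)) = 1 := by omega
        simp [this, h1] at hret
      have hND : ¬ (desc = 2 ∧ x.toNat = y.toNat + 1) := by
        rintro ⟨h1, h2⟩; push_neg at hret; rw [hdesc'] at hret
        have : ((y.toNat : Int) - (x.toNat : Int)) = -1 := by omega
        simp [this, h1] at hret
      clear hret ih ha hd ha' hd' hasc' hdesc'
      clear_value asc' desc'
      cases rs with
      | nil =>
        simp only [hasTriple, ascHead, descHead]
        by_cases q1 : y.toNat = x.toNat + 1 <;>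
        by_cases q3 : x.toNat = y.toNat + 1 <;>
          first
            | (exfalso; omega)
            | simp_all
      | cons z zs =>
        simp only [hasTriple, ascHead, descHead, hA, hD]
        by_cases q1 : y.toNat = x.toNat + 1 <;>
        by_cases q2 : z.toNat = y.toNat + 1 <;>
        by_cases q3 : x.toNat = y.toNat + 1 <;>
        by_cases q4 : y.toNat = z.toNat + 1 <;>
          first
            | (exfalso; omega)
            | simp_all

-- ===== VERDICT (by name: the statement is the Claim_ definition above) =====
theorem has_sequential_py_spec : Claim_equal_has_sequential_py := by
  intro s _
  show has_sequential_py s = has_sequential_py_alt s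
  rw [has_sequential_py, has_sequential_py_alt, aLoop_eq, List.drop_zero]
  cases hs : s.toList with
  | nil => rfl
  | cons x rest =>
    rw [bLoop_eq rest x 1 1 (Or.inl rfl) (Or.inl rfl)]
    simp
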